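-- pv_equiv track=rewrite | github.com/hmchen47/Programming | Python/MIT-CompThinking/MITx600.1x/ProblemSets/PS6/applyCoder.py | buildCoder
-- ===== SOURCE A (Python) =====
-- def buildCoder(shift):
--     """
--     Returns a dict that can apply a Caesar cipher to a letter.
--     The cipher is defined by the shift value. Ignores non-letter characters
--     like punctuation, numbers, and spaces.
--
--     shift: 0 <= int < 26
--     returns: dict
--     """
--     ### TODO
--     dict_coder = {}
--
--     # this function use ord() to convert ascii into interger
--     # however, space should be handled as an exception due to discontinuity
--     # ord('A') = 65, ord('B') = 66, ..., ord('Z') = 90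
--     # ord('a') = 97, ord('b') = 98, ..., ord('Z') = 122
--     # using 65 as the base_shift for upper cases to make these letters align to A
--     # using 97 as the base_shift for lower cases to make these letters align to a
--     # i.e. ' ' = 0, 'a' = 1, 'b' = 2, ..., 'z' = 26
--     baseC = 65
--     baseL = 97
--     letter_size = 26
--
--     # dealing with lower cases
--     # create mapping with given shift with cyclic buffer
--     # dealing with space and letters
--     for idx in range(letter_size):
--         key = chr(idx+baseL)
--
--         #if (idx+shift) % letter_size == 0:
--         #    value = 'z'
--         #else:
--         #print chr(idx+baseL), chr(((idx+shift) % letter_size) + baseL)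
--         value =  chr(((idx+shift) % letter_size) + baseL)
--         dict_coder[key] = value
--
--     # dealing with upper cases
--     for idx in range(letter_size):
--         key = chr(idx+baseC)
--         #if (idx+shift) % letter_size == 0:
--         #    value = 'Z'
--         #else:
--
--         #print chr(idx+baseC), chr(((idx+shift) % letter_size) + baseC)
--         value = chr(((idx+shift) % (letter_size)) + baseC)
--         dict_coder[key] = value
--
--     return dict_coder
-- ===== SOURCE B (Python) =====
-- def buildCoder(shift):
--     """
--     Returns a dict that can apply a Caesar cipher to a letter.
--     Rotate-the-alphabet-then-zip construction instead of per-letter index/mod loops.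
--     """
--     r = shift % 26
--     low = 'abcdefghijklmnopqrstuvwxyz'
--     up = low.upper()
--     coder = dict(zip(low, low[r:] + low[:r]))
--     coder.update(zip(up, up[r:] + up[:r]))
--     return coder
-- ===== Notes on version B (the rewrite author's own statement) =====
-- stated objective: idiomatic
-- what changed: Replaces A's two per-letter index+modulo loops (one chr()/dict store per letter) with reducing the shift modulo the alphabet length once, rotating each alphabet by slicing (low[r:] + low[:r]) and building the mapping with dict(zip(...)) plus dict.update.
import Mathlib
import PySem

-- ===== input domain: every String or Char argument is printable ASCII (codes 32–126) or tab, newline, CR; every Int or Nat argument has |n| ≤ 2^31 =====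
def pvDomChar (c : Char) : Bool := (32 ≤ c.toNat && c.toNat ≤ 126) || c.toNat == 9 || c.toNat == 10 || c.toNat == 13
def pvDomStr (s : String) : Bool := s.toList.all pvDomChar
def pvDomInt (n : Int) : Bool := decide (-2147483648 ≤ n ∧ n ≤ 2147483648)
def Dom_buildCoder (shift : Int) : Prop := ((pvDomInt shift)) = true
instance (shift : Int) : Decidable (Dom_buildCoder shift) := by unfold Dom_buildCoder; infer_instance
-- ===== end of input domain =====

-- B replaces A's two index+modulo per-letter loops by rotating each alphabet with slices and zipping it
-- against the original (objective: idiomatic); same return value for every int shift.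

-- chr(n) as a 1-char string; exact for the codes 65–122 that occur here
def pyChr (n : Int) : String := String.ofList [Char.ofNat n.toNat]

-- ===== PORT A =====
def buildCoder (shift : Int) : List (String × String) :=
  let dict_coder : PySem.Dict String String := PySem.Dict.empty
  -- lower-case loop
  let dict_coder := (PySem.List.pyRange 0 26 1).foldl (fun d idx =>
    let key := pyChr (idx + 97)
    let value := pyChr (PySem.Int.mod (idx + shift) 26 + 97)
    d.insert key value) dict_coder
  -- upper-case loop
  let dict_coder := (PySem.List.pyRange 0 26 1).foldl (fun d idx =>
    let key := pyChr (idx + 65)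
    let value := pyChr (PySem.Int.mod (idx + shift) 26 + 65)
    d.insert key value) dict_coder
  dict_coder.items

-- ===== PORT B =====
def buildCoder_alt (shift : Int) : List (String × String) :=
  let r := PySem.Int.mod shift 26
  let low := "abcdefghijklmnopqrstuvwxyz".toList
  let up := PySem.Chars.upper low
  let rotLow := PySem.List.slice low (some r) none ++ PySem.List.slice low none (some r)
  let rotUp := PySem.List.slice up (some r) none ++ PySem.List.slice up none (some r)
  let coder := PySem.Dict.ofList ((low.zip rotLow).map (fun p => (String.ofList [p.1], String.ofList [p.2])))
  -- coder.update(zip(up, rot_up))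
  let coder := ((up.zip rotUp).map (fun p => (String.ofList [p.1], String.ofList [p.2]))).foldl
    (fun d p => d.insert p.1 p.2) coder
  coder.items

-- ===== PRECONDITION & SPEC =====
def Spec_buildCoder (shift : Int) (out : List (String × String)) : Prop := out = buildCoder_alt shift
instance (shift : Int) (out : List (String × String)) : Decidable (Spec_buildCoder shift out) := by unfold Spec_buildCoder; infer_instance

-- ===== CLAIM (what is proved, stated in full; the proofs are below) =====
def Claim_equal_buildCoder : Prop := ∀ (shift : Int), Dom_buildCoder shift → Spec_buildCoder shift (buildCoder shift)

-- ===== LEMMAS AND PROOFS =====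

-- A depends on shift only through shift % 26
lemma buildCoder_mod (shift r : Int) (h : PySem.Int.mod shift 26 = PySem.Int.mod r 26) :
    buildCoder shift = buildCoder r := by
  have hm : ∀ idx : Int, PySem.Int.mod (idx + shift) 26 = PySem.Int.mod (idx + r) 26 := by
    intro idx
    rw [PySem.Int.mod_eq_emod_of_pos (by norm_num : (0:Int) < 26)] at h ⊢
    rw [PySem.Int.mod_eq_emod_of_pos (by norm_num : (0:Int) < 26)] at h ⊢
    omega
  simp only [buildCoder, hm]

set_option maxRecDepth 8192 in
set_option maxHeartbeats 4000000 in
theorem buildCoder_spec : Claim_equal_buildCoder := by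
  intro shift _
  unfold Spec_buildCoder
  have h0 : 0 ≤ PySem.Int.mod shift 26 := PySem.Int.mod_nonneg _ (by norm_num)
  have h26 : PySem.Int.mod shift 26 < 26 := PySem.Int.mod_lt _ (by norm_num)
  set r := PySem.Int.mod shift 26 with hr
  have hrr : PySem.Int.mod r 26 = r := by
    rw [PySem.Int.mod_eq_emod_of_pos (by norm_num : (0:Int) < 26)]
    omega
  have hA : buildCoder shift = buildCoder r := buildCoder_mod shift r (by rw [hrr])
  have hB : buildCoder_alt shift = buildCoder_alt r := by
    simp only [buildCoder_alt, hrr, ← hr]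
  rw [hA, hB]
  interval_cases r <;> rfl
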